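-- pv_equiv track=rewrite | github.com/1190398/LAMEC | steps/brain.py | evaluate
-- ===== SOURCE A (Python) =====
-- PLAYER_1 = 1
--
-- PLAYER_2 = 2
--
-- KING_1 = 3
--
-- KING_2 = 4
--
-- def evaluate(board, current_player):
--     score_player_1 = 0
--     score_player_2 = 0
--
--     eatingScore = 1
--     kingScore = 2
--
--     for row in board:
--         for cell in row:
--             if cell == PLAYER_1:
--                 score_player_1 += eatingScore
--             elif cell == KING_1:
--                 score_player_1 += kingScore
--             elif cell == PLAYER_2:
--                 score_player_2 += eatingScore
--             elif cell == KING_2: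
--                 score_player_2 += kingScore
--
--     if current_player == PLAYER_2:
--     # Reverse scores if it's Player 2's turn
--         score_player_1, score_player_2 = score_player_2, score_player_1
--
--     return score_player_1 - score_player_2
-- ===== SOURCE B (Python) =====
-- PLAYER_1 = 1
--
-- PLAYER_2 = 2
--
-- KING_1 = 3
--
-- KING_2 = 4
--
-- def evaluate(board, current_player):
--     cells = [cell for row in board for cell in row]
--     score_player_1 = cells.count(PLAYER_1) + 2 * cells.count(KING_1)
--     score_player_2 = cells.count(PLAYER_2) + 2 * cells.count(KING_2)
--     diff = score_player_1 - score_player_2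
--     return -diff if current_player == PLAYER_2 else diff
-- ===== Notes on version B (the rewrite author's own statement) =====
-- stated objective: simpler
-- what changed: Replaces the per-cell if/elif branching scan with a flatten-then-tally decomposition: flatten the board once, count each piece type, and compute both scores by plain arithmetic over the counts (negating the difference instead of swapping the scores).
import Mathlib
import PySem

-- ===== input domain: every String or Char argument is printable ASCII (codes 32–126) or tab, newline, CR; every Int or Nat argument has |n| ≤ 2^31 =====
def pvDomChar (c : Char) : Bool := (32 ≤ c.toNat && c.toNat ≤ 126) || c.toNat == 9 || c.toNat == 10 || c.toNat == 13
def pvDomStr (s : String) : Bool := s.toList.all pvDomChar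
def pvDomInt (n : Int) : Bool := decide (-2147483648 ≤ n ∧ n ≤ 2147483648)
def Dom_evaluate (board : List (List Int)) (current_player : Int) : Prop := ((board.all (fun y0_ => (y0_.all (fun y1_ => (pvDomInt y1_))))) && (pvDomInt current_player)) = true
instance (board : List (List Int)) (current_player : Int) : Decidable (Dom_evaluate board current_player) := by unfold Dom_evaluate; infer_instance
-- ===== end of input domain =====

-- B is simpler: flatten the board once, tally each piece value with list.count,
-- and compute the result by arithmetic over the tallies (negating instead of swapping).

-- ===== PORT A =====
def evaluate (board : List (List Int)) (current_player : Int) : Int :=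
  let scores : Int × Int := board.foldl (fun (s : Int × Int) row =>
    row.foldl (fun (s : Int × Int) cell =>
      if cell == 1 then (s.1 + 1, s.2)
      else if cell == 3 then (s.1 + 2, s.2)
      else if cell == 2 then (s.1, s.2 + 1)
      else if cell == 4 then (s.1, s.2 + 2)
      else s) s) (0, 0)
  let scores := if current_player == 2 then (scores.2, scores.1) else scores
  scores.1 - scores.2

-- ===== PORT B =====
def evaluate_alt (board : List (List Int)) (current_player : Int) : Int :=
  let cells := board.flatMap (fun row => row)
  let score_player_1 : Int := PySem.List.count cells 1 + 2 * PySem.List.count cells 3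
  let score_player_2 : Int := PySem.List.count cells 2 + 2 * PySem.List.count cells 4
  let diff := score_player_1 - score_player_2
  if current_player == 2 then -diff else diff

-- ===== PRECONDITION & SPEC =====
def Spec_evaluate (board : List (List Int)) (current_player : Int) (out : Int) : Prop := out = evaluate_alt board current_player
instance (board : List (List Int)) (current_player : Int) (out : Int) : Decidable (Spec_evaluate board current_player out) := by unfold Spec_evaluate; infer_instance

-- ===== CLAIM (what is proved, stated in full; the proofs are below) =====
def Claim_equal_evaluate : Prop := ∀ (board : List (List Int)) (current_player : Int), Dom_evaluate board current_player → Spec_evaluate board current_player (evaluate board current_player)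

-- ===== LEMMAS AND PROOFS =====

-- the per-row foldl of A, over any cell list, adds the count-based tallies
theorem pv_row_foldl (cells : List Int) (s : Int × Int) :
    cells.foldl (fun (s : Int × Int) cell =>
      if cell == 1 then (s.1 + 1, s.2)
      else if cell == 3 then (s.1 + 2, s.2)
      else if cell == 2 then (s.1, s.2 + 1)
      else if cell == 4 then (s.1, s.2 + 2)
      else s) s
    = (s.1 + PySem.List.count cells 1 + 2 * PySem.List.count cells 3,
       s.2 + PySem.List.count cells 2 + 2 * PySem.List.count cells 4) := by
  induction cells generalizing s with
  | nil => simp [PySem.List.count]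
  | cons c cs ih =>
    simp only [List.foldl_cons, ih, PySem.List.count, List.count_cons]
    by_cases h1 : c = 1 <;> by_cases h2 : c = 2 <;> by_cases h3 : c = 3 <;> by_cases h4 : c = 4 <;>
      simp_all <;> push_cast <;> ring_nf

theorem pv_board_foldl (board : List (List Int)) (s : Int × Int) :
    board.foldl (fun (s : Int × Int) row =>
      row.foldl (fun (s : Int × Int) cell =>
        if cell == 1 then (s.1 + 1, s.2)
        else if cell == 3 then (s.1 + 2, s.2)
        else if cell == 2 then (s.1, s.2 + 1)
        else if cell == 4 then (s.1, s.2 + 2)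
        else s) s) s
    = (s.1 + PySem.List.count (board.flatMap (fun row => row)) 1
           + 2 * PySem.List.count (board.flatMap (fun row => row)) 3,
       s.2 + PySem.List.count (board.flatMap (fun row => row)) 2
           + 2 * PySem.List.count (board.flatMap (fun row => row)) 4) := by
  induction board generalizing s with
  | nil => simp [PySem.List.count]
  | cons r rs ih =>
    rw [List.foldl_cons, ih, pv_row_foldl]
    simp only [List.flatMap_cons, PySem.List.count, List.count_append, Prod.mk.injEq]
    constructor <;> push_cast <;> ring

-- ===== VERDICT (by name: the statement is the Claim_ definition above) =====
theorem evaluate_spec : Claim_equal_evaluate := by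
  intro board current_player _
  show evaluate board current_player = evaluate_alt board current_player
  simp only [evaluate, evaluate_alt, pv_board_foldl]
  by_cases h : current_player = 2 <;> simp [h]
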